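-- pv_equiv track=rewrite | github.com/yxkelan/CodeEval-Challenges | solutions/codility.py | solution_prefix
-- ===== SOURCE A (Python) =====
-- def solution_prefix( A ):
--
--    D = {}
--    sum = 0
--    for v in A:
--      if not v in D:
--        D[v]=1
--        sum += 1
--
--    for i,v in enumerate(A):
--     if D[v] == 1:
--       D[v] = 0
--       sum -= 1
--     if sum == 0:
--       return i
-- ===== SOURCE B (Python) =====
-- def solution_prefix(A):
--     first = {}
--     for i, v in enumerate(A):
--         if v not in first:
--             first[v] = i
--     if not first:
--         return None
--     return max(first.values())
-- ===== Notes on version B (the rewrite author's own statement) =====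
-- stated objective: simpler
-- what changed: A's two passes (count distinct values, then decrement a counter until it hits zero) are replaced by one pass recording each value's first-occurrence index into a dict, whose maximum is the answer; the empty list still yields None.
import Mathlib
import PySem

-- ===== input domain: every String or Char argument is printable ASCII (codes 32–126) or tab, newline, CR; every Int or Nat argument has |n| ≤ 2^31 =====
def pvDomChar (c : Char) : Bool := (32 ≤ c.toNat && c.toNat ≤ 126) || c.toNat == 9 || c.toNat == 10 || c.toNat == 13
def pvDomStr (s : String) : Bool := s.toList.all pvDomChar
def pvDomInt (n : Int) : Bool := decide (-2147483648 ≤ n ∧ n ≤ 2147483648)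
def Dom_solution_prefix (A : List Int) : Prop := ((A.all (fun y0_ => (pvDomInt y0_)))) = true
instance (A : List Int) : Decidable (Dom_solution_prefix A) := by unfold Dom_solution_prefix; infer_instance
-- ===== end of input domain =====

-- B replaces A's two passes (count distinct, then decrement a counter until it hits zero)
-- by one pass recording each value's first-occurrence index; the maximum recorded index is the answer (objective: simpler).

-- ===== PORT A =====
-- second loop of A: for i,v in enumerate(A): if D[v]==1: D[v]=0; sum-=1; if sum==0: return i
def solution_prefix_loop : PySem.Dict Int Int → Int → List (Int × Int) → Option Int
  | _, _, [] => none
  | D, sum, (i, v) :: rest =>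
    let st := if D.getD v 0 == 1 then (D.insert v 0, sum - 1) else (D, sum)
    if st.2 == 0 then some i else solution_prefix_loop st.1 st.2 rest

def solution_prefix (A : List Int) : Option Int :=
  let st := A.foldl
    (fun (st : PySem.Dict Int Int × Int) v =>
      if !(st.1.contains v) then (st.1.insert v 1, st.2 + 1) else st)
    (PySem.Dict.empty, 0)
  solution_prefix_loop st.1 st.2 (PySem.List.enumerate A)

-- ===== PORT B =====
def solution_prefix_alt (A : List Int) : Option Int :=
  let first := (PySem.List.enumerate A).foldl
    (fun (d : PySem.Dict Int Int) p => if !(d.contains p.2) then d.insert p.2 p.1 else d)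
    PySem.Dict.empty
  if first.size == 0 then none
  else PySem.List.max? first.values (fun x => x)

-- ===== PRECONDITION & SPEC =====
def Spec_solution_prefix (A : List Int) (out : Option Int) : Prop := out = solution_prefix_alt A
instance (A : List Int) (out : Option Int) : Decidable (Spec_solution_prefix A out) := by unfold Spec_solution_prefix; infer_instance

-- ===== CLAIM (what is proved, stated in full; the proofs are below) =====
def Claim_equal_solution_prefix : Prop := ∀ (A : List Int), Dom_solution_prefix A → Spec_solution_prefix A (solution_prefix A)

-- ===== LEMMAS AND PROOFS =====

-- proof-side names for the two fold bodies (definitionally equal to the lambdas in the ports)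
def stepA (st : PySem.Dict Int Int × Int) (v : Int) : PySem.Dict Int Int × Int :=
  if !(st.1.contains v) then (st.1.insert v 1, st.2 + 1) else st

def stepB (d : PySem.Dict Int Int) (p : Int × Int) : PySem.Dict Int Int :=
  if !(d.contains p.2) then d.insert p.2 p.1 else d

-- index (within L) at which the pending set S becomes exhausted while scanning L
def idxCover (S : List Int) : List Int → Int
  | [] => 0
  | v :: rest => if S.erase v = [] then 0 else 1 + idxCover (S.erase v) rest

-- the increasing list of first-occurrence indices B records, starting at index k, past the values in 'seen'
def newIdx (seen : List Int) (k : Int) : List Int → List Int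
  | [] => []
  | v :: rest => if v ∈ seen then newIdx seen (k + 1) rest
                 else k :: newIdx (v :: seen) (k + 1) rest

lemma idxCover_nonneg (S : List Int) (L : List Int) : 0 ≤ idxCover S L := by
  induction L generalizing S with
  | nil => simp [idxCover]
  | cons v rest ih =>
    simp only [idxCover]
    split
    · exact le_refl 0
    · have := ih (S.erase v); omega

-- A's second loop returns k + idxCover S L when D marks with 1 exactly the members of S, all of which occur in L
lemma loop_spec (L : List Int) : ∀ (S : List Int) (D : PySem.Dict Int Int) (k : Int),
    S.Nodup → S ≠ [] → (∀ w ∈ S, w ∈ L) → (∀ w, D.getD w 0 = 1 ↔ w ∈ S) →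
    solution_prefix_loop D S.length (PySem.List.enumerate L k) = some (k + idxCover S L) := by
  induction L with
  | nil =>
    intro S D k _ hne hsub _
    obtain ⟨v, hv⟩ := List.exists_mem_of_ne_nil S hne
    exact absurd (hsub v hv) (by simp)
  | cons v rest ih =>
    intro S D k hnd hne hsub hD
    rw [PySem.List.enumerate_cons]
    by_cases hv : v ∈ S
    · have h1 : D.getD v 0 = 1 := (hD v).mpr hv
      have hlen : (S.erase v).length = S.length - 1 := List.length_erase_of_mem hv
      have hpos : 1 ≤ S.length := List.length_pos_of_mem hv
      simp only [solution_prefix_loop, h1, if_pos, beq_self_eq_true]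
      by_cases he : S.erase v = []
      · have hS1 : S.length = 1 := by
          have := hlen; rw [he] at this; simp at this; omega
        simp [hS1, idxCover, he]
      · have hlen2 : 1 ≤ (S.erase v).length := List.length_pos_of_ne_nil he
        have hne2 : ((S.length : Int) - 1) ≠ 0 := by
          have : (S.erase v).length ≥ 1 := hlen2
          omega
        rw [if_neg (by simpa using hne2)]
        have hrec := ih (S.erase v) (D.insert v 0) (k + 1) (hnd.erase v) he
          (fun w hw => by
            have hw' := (hnd.mem_erase_iff).mp hw
            rcases List.mem_cons.mp (hsub w hw'.2) with h | h
            · exact absurd h hw'.1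
            · exact h)
          (fun w => by
            rw [PySem.Dict.getD_insert]
            constructor
            · intro h; split at h
              · omega
              · exact (hnd.mem_erase_iff).mpr ⟨by rename_i hne3; exact hne3, (hD w).mp h⟩
            · intro h
              have ⟨hne3, hmem⟩ := (hnd.mem_erase_iff).mp h
              rw [if_neg hne3]; exact (hD w).mpr hmem)
        have : ((S.length : Int) - 1) = ((S.erase v).length : Int) := by omega
        rw [this, hrec]
        simp only [idxCover, if_neg he]
        congr 1; ring
    · have h1 : D.getD v 0 ≠ 1 := fun h => hv ((hD v).mp h)
      have hSpos : 1 ≤ S.length := by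
        obtain ⟨w, hw⟩ := List.exists_mem_of_ne_nil S hne
        exact List.length_pos_of_mem hw
      simp only [solution_prefix_loop, beq_iff_eq, if_neg h1]
      rw [if_neg (by simp; omega)]
      have hrec := ih S D (k + 1) hnd hne
        (fun w hw => by
          rcases List.mem_cons.mp (hsub w hw) with h | h
          · exact absurd (h ▸ hw) hv
          · exact h)
        hD
      rw [hrec]
      simp only [idxCover, List.erase_of_not_mem hv, if_neg hne]
      congr 1; ring

-- invariant for A's first pass: the fold produces the distinct-count and a dict marking exactly the distinct values with 1
lemma passA (l : List Int) : ∀ (d : PySem.Dict Int Int) (S : List Int),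
    S.Nodup → (∀ w, d.contains w = true ↔ w ∈ S) → (∀ w, d.getD w 0 = if w ∈ S then 1 else 0) →
    ∃ S' : List Int, S'.Nodup ∧ (∀ w, w ∈ S' ↔ w ∈ S ∨ w ∈ l) ∧
      (l.foldl stepA (d, (S.length : Int))).2 = S'.length ∧
      (∀ w, ((l.foldl stepA (d, (S.length : Int))).1).getD w 0 = if w ∈ S' then 1 else 0) := by
  induction l with
  | nil =>
    intro d S hnd hc hg
    exact ⟨S, hnd, by simp, by simp, hg⟩
  | cons v rest ih =>
    intro d S hnd hc hg
    by_cases hv : v ∈ S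
    · have : stepA (d, (S.length : Int)) v = (d, (S.length : Int)) := by
        simp [stepA, (hc v).mpr hv]
      rw [List.foldl_cons, this]
      obtain ⟨S', h1, h2, h3, h4⟩ := ih d S hnd hc hg
      refine ⟨S', h1, fun w => ?_, h3, h4⟩
      rw [h2]; simp only [List.mem_cons]
      rcases eq_or_ne w v with rfl | hwv
      · simp [hv]
      · simp [hwv]
    · have hcv : d.contains v = false := by
        rcases Bool.eq_false_or_eq_true (d.contains v) with h | h
        · exact absurd ((hc v).mp h) hv
        · exact h
      have hstep : stepA (d, (S.length : Int)) v = (d.insert v 1, ((v :: S).length : Int)) := by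
        simp [stepA, hcv]
      rw [List.foldl_cons, hstep]
      obtain ⟨S', h1, h2, h3, h4⟩ := ih (d.insert v 1) (v :: S) (List.nodup_cons.mpr ⟨hv, hnd⟩)
        (fun w => by
          rw [PySem.Dict.contains_insert]
          simp [List.mem_cons, ← hc w])
        (fun w => by
          rw [PySem.Dict.getD_insert]
          by_cases hw : w = v
          · simp [hw]
          · simp [hw, hg w])
      refine ⟨S', h1, fun w => by rw [h2]; simp; tauto, h3, h4⟩

lemma newIdx_nil_of_sub (L : List Int) : ∀ (seen : List Int) (k : Int),
    (∀ w ∈ L, w ∈ seen) → newIdx seen k L = [] := by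
  induction L with
  | nil => intro _ _ _; rfl
  | cons v rest ih =>
    intro seen k h
    have hv : v ∈ seen := h v (by simp)
    simp only [newIdx, if_pos hv]
    exact ih seen (k + 1) (fun w hw => h w (by simp [hw]))

-- B's pass appends to the dict's values exactly the first-occurrence indices of the not-yet-seen values
lemma passB (L : List Int) : ∀ (d : PySem.Dict Int Int) (seen : List Int) (k : Int),
    (∀ w, d.contains w = true ↔ w ∈ seen) →
    ((PySem.List.enumerate L k).foldl stepB d).values = d.values ++ newIdx seen k L := by
  induction L with
  | nil => intro d seen k _; simp [PySem.List.enumerate, newIdx]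
  | cons v rest ih =>
    intro d seen k hc
    rw [PySem.List.enumerate_cons, List.foldl_cons]
    by_cases hv : v ∈ seen
    · have : stepB d (k, v) = d := by simp [stepB, (hc v).mpr hv]
      rw [this, ih d seen (k + 1) hc]
      simp [newIdx, hv]
    · have hcv : d.contains v = false := by
        rcases Bool.eq_false_or_eq_true (d.contains v) with h | h
        · exact absurd ((hc v).mp h) hv
        · exact h
      have hstep : stepB d (k, v) = d.insert v k := by simp [stepB, hcv]
      rw [hstep, ih (d.insert v k) (v :: seen) (k + 1)
        (fun w => by rw [PySem.Dict.contains_insert]; simp [← hc w])]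
      have hvals : (d.insert v k).values = d.values ++ [k] := by
        simp only [PySem.Dict.values, PySem.Dict.items_insert_of_not_contains d k hcv,
          List.map_append, List.map_cons, List.map_nil]
      rw [hvals]
      simp [newIdx, hv]

lemma foldl_max_comm (t : List Int) : ∀ (k x : Int), t.foldl max (max k x) = max k (t.foldl max x) := by
  induction t with
  | nil => intro k x; rfl
  | cons y t ih =>
    intro k x
    simp only [List.foldl]
    rw [max_assoc]
    exact ih k (max x y)

lemma max?_id_cons_of_le {t : List Int} {m k : Int}
    (h : PySem.List.max? t (fun x => x) = some m) (hk : k ≤ m) :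
    PySem.List.max? (k :: t) (fun x => x) = some m := by
  cases t with
  | nil => simp [PySem.List.max?] at h
  | cons x t' =>
    rw [PySem.List.max?_id_cons] at h ⊢
    injection h with h
    simp only [List.foldl]
    rw [foldl_max_comm, h, max_eq_right hk]

-- the maximum first-occurrence index is k + idxCover S L when S is exactly the unseen values of L
lemma max_newIdx (L : List Int) : ∀ (S seen : List Int) (k : Int),
    S.Nodup → S ≠ [] → (∀ w, w ∈ S ↔ w ∈ L ∧ w ∉ seen) →
    PySem.List.max? (newIdx seen k L) (fun x => x) = some (k + idxCover S L) := by
  induction L with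
  | nil =>
    intro S seen k _ hne hmem
    obtain ⟨v, hv⟩ := List.exists_mem_of_ne_nil S hne
    exact absurd ((hmem v).mp hv).1 (by simp)
  | cons v rest ih =>
    intro S seen k hnd hne hmem
    by_cases hv : v ∈ seen
    · have hvS : v ∉ S := fun h => ((hmem v).mp h).2 hv
      have herase : S.erase v = S := List.erase_of_not_mem hvS
      simp only [newIdx, if_pos hv, idxCover, herase, if_neg hne]
      rw [ih S seen (k + 1) hnd hne (fun w => by
        rw [hmem w]
        constructor
        · rintro ⟨hw, hws⟩
          rcases List.mem_cons.mp hw with rfl | hw'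
          · exact absurd hv hws
          · exact ⟨hw', hws⟩
        · rintro ⟨hw, hws⟩; exact ⟨List.mem_cons_of_mem v hw, hws⟩)]
      congr 1; ring
    · have hvS : v ∈ S := (hmem v).mpr ⟨by simp, hv⟩
      have hmem' : ∀ w, w ∈ S.erase v ↔ w ∈ rest ∧ w ∉ v :: seen := by
        intro w
        rw [hnd.mem_erase_iff, hmem w]
        simp only [List.mem_cons]
        constructor
        · rintro ⟨hwv, hw, hws⟩
          rcases hw with rfl | hw'
          · exact absurd rfl hwv
          · exact ⟨hw', fun h => h.elim hwv hws⟩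
        · rintro ⟨hw, hws⟩
          exact ⟨fun h => hws (Or.inl h), Or.inr hw, fun h => hws (Or.inr h)⟩
      simp only [newIdx, if_neg hv, idxCover]
      by_cases he : S.erase v = []
      · have hsub : ∀ w ∈ rest, w ∈ v :: seen := by
          intro w hw
          by_contra hws
          have : w ∈ S.erase v := (hmem' w).mpr ⟨hw, hws⟩
          rw [he] at this; exact absurd this (by simp)
        rw [newIdx_nil_of_sub rest (v :: seen) (k + 1) hsub]
        simp [he, PySem.List.max?_id_cons]
      · rw [if_neg he]
        have hrec := ih (S.erase v) (v :: seen) (k + 1) (hnd.erase v) he hmem'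
        have hk : k ≤ k + 1 + idxCover (S.erase v) rest := by
          have := idxCover_nonneg (S.erase v) rest; omega
        rw [max?_id_cons_of_le hrec hk]
        congr 1; ring

-- ===== VERDICT (by name: the statement is the Claim_ definition above) =====
theorem solution_prefix_spec : Claim_equal_solution_prefix := by
  intro A _
  show solution_prefix A = solution_prefix_alt A
  cases A with
  | nil => rfl
  | cons a A' =>
    -- A-side: first pass
    obtain ⟨S', hnd, hmem, hsum, hgetD⟩ := passA (a :: A') PySem.Dict.empty []
      List.nodup_nil (by simp [PySem.Dict.contains_empty]) (by simp [PySem.Dict.getD_empty])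
    have hmem' : ∀ w, w ∈ S' ↔ w ∈ a :: A' := fun w => by rw [hmem w]; simp
    have hSne : S' ≠ [] := by
      intro h
      have := (hmem' a).mpr (by simp)
      rw [h] at this; exact absurd this (by simp)
    have hA : solution_prefix (a :: A') = some (0 + idxCover S' (a :: A')) := by
      show solution_prefix_loop ((a :: A').foldl stepA (PySem.Dict.empty, (([] : List Int).length : Int))).1
             ((a :: A').foldl stepA (PySem.Dict.empty, (([] : List Int).length : Int))).2
             (PySem.List.enumerate (a :: A') 0) = _
      rw [hsum]
      exact loop_spec (a :: A') S' _ 0 hnd hSne (fun w hw => (hmem' w).mp hw)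
        (fun w => by rw [hgetD w]; split <;> simp_all)
    -- B-side: the first-occurrence dict
    have hvals : ((PySem.List.enumerate (a :: A') 0).foldl stepB PySem.Dict.empty).values
        = newIdx [] 0 (a :: A') := by
      rw [passB (a :: A') PySem.Dict.empty [] 0 (by simp [PySem.Dict.contains_empty])]
      rfl
    have hvne : newIdx [] 0 (a :: A') = 0 :: newIdx [a] 1 A' := by simp [newIdx]
    have hB : solution_prefix_alt (a :: A') = some (0 + idxCover S' (a :: A')) := by
      show (if ((PySem.List.enumerate (a :: A') 0).foldl stepB PySem.Dict.empty).size == 0 then none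
            else PySem.List.max? ((PySem.List.enumerate (a :: A') 0).foldl stepB PySem.Dict.empty).values (fun x => x))
            = _
      have hsz : ((PySem.List.enumerate (a :: A') 0).foldl stepB PySem.Dict.empty).size ≠ 0 := by
        intro h
        have : ((PySem.List.enumerate (a :: A') 0).foldl stepB PySem.Dict.empty).values.length = 0 := by
          simpa [PySem.Dict.size, PySem.Dict.values] using h
        rw [hvals, hvne] at this
        simp at this
      rw [if_neg (by simpa using hsz), hvals]
      exact max_newIdx (a :: A') S' [] 0 hnd hSne (fun w => by rw [hmem' w]; simp)
    rw [hA, hB]
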